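-- pv_equiv track=rewrite | github.com/sfc-gh-jiyan/MacWhisper | app.py | _snap_to_boundary
-- ===== SOURCE A (Python) =====
-- def _snap_to_boundary(text, pos):
--     """Snap a position back to the nearest sentence-ending punctuation."""
--     if pos <= 0:
--         return 0
--     end = min(pos, len(text))
--     for i in range(end - 1, max(0, end - 40) - 1, -1):
--         if text[i] in '。！？.!?\n':
--             return i + 1
--     return end
-- ===== SOURCE B (Python) =====
-- def _snap_to_boundary(text, pos):
--     """Snap a position back to the nearest sentence-ending punctuation."""
--     if pos <= 0:
--         return 0
--     end = min(pos, len(text))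
--     start = max(0, end - 40)
--     best = -1
--     for ch in '。！？.!?\n':
--         best = max(best, text.rfind(ch, start, end))
--     return end if best == -1 else best + 1
-- ===== Notes on version B (the rewrite author's own statement) =====
-- stated objective: alternative
-- what changed: Replaces the single backward character-by-character scan with one rfind (last-occurrence) query per punctuation character over the 40-char window, combined by max.
import Mathlib
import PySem

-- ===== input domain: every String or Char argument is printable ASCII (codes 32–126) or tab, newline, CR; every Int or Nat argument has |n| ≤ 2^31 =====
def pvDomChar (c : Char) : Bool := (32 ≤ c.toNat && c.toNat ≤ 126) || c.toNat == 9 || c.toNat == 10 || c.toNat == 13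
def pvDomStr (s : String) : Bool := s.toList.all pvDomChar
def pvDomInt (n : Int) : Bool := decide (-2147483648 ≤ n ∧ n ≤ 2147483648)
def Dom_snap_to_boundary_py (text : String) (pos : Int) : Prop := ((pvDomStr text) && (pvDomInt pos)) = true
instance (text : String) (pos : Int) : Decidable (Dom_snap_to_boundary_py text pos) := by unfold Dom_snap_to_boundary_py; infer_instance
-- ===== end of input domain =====

-- B replaces A's single backward character scan by one rfind (last-occurrence) query per
-- punctuation character over the same window, combined with max (objective: alternative).

-- ===== PORT A =====
-- A's literal '。！？.!?\n' as its list of characters; Python's `ch in '。！？.!?\n'` for the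
-- single character ch = text[i] is exactly membership in this list.
def pvPunct : List Char := ['。', '！', '？', '.', '!', '?', '\n']

-- the for-loop of A over the descending index list: first index i whose character is
-- punctuation yields i+1, else fall through to `end`.  Every generated index satisfies
-- 0 ≤ i < len(text), so text[i] never raises; pyGetD with an arbitrary default is exact there.
def pvALoop (cs : List Char) (e : Int) : List Int → Int
  | [] => e
  | i :: rest =>
      if pvPunct.contains (PySem.List.pyGetD cs i ' ') then i + 1 else pvALoop cs e rest

def snap_to_boundary_py (text : String) (pos : Int) : Int :=
  if pos ≤ 0 then 0
  else
    let e := min pos (PySem.Str.len text)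
    pvALoop text.toList e (PySem.List.pyRange (e - 1) (max 0 (e - 40) - 1) (-1))

-- ===== PORT B =====
def snap_to_boundary_py_alt (text : String) (pos : Int) : Int :=
  if pos ≤ 0 then 0
  else
    let e := min pos (PySem.Str.len text)
    let s := max 0 (e - 40)
    let best := pvPunct.foldl
      (fun b c => max b (PySem.Str.rfindFrom text (String.ofList [c]) s (some e))) (-1)
    if best = -1 then e else best + 1

-- ===== PRECONDITION & SPEC =====
def Spec_snap_to_boundary_py (text : String) (pos : Int) (out : Int) : Prop := out = snap_to_boundary_py_alt text pos
instance (text : String) (pos : Int) (out : Int) : Decidable (Spec_snap_to_boundary_py text pos out) := by unfold Spec_snap_to_boundary_py; infer_instance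

-- ===== CLAIM (what is proved, stated in full; the proofs are below) =====
def Claim_equal_snap_to_boundary_py : Prop := ∀ (text : String) (pos : Int), Dom_snap_to_boundary_py text pos → Spec_snap_to_boundary_py text pos (snap_to_boundary_py text pos)

-- ===== LEMMAS AND PROOFS =====

-- last index i in L (an ascending index list) with p (cs[i]), sentinel -1
def pvLast (cs : List Char) (p : Char → Bool) (L : List Int) : Int :=
  L.foldl (fun a i => if p (PySem.List.pyGetD cs i ' ') then i else a) (-1)

-- first index i in L (a descending index list) with p (cs[i]), sentinel -1
def pvFirst (cs : List Char) (p : Char → Bool) : List Int → Int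
  | [] => -1
  | i :: r => if p (PySem.List.pyGetD cs i ' ') then i else pvFirst cs p r

theorem pvLast_init (cs : List Char) (p : Char → Bool) :
    ∀ (L : List Int) (a : Int), (∀ i ∈ L, 0 ≤ i) →
      L.foldl (fun a i => if p (PySem.List.pyGetD cs i ' ') then i else a) a
        = if pvLast cs p L = -1 then a else pvLast cs p L := by
  intro L
  induction L with
  | nil => intro a _; simp [pvLast]
  | cons i L ih =>
    intro a h
    have hi : 0 ≤ i := h i (by simp)
    have hL : ∀ j ∈ L, 0 ≤ j := fun j hj => h j (by simp [hj])
    have hstep : pvLast cs p (i :: L)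
        = if pvLast cs p L = -1 then (if p (PySem.List.pyGetD cs i ' ') then i else (-1))
          else pvLast cs p L := by
      unfold pvLast
      simp only [List.foldl_cons]
      exact ih _ hL
    rw [hstep]
    simp only [List.foldl_cons]
    rw [ih _ hL]
    split_ifs <;> omega

theorem pvFoldl_le (cs : List Char) (p : Char → Bool) (j : Int) :
    ∀ (L : List Int) (a : Int), a ≤ j → (∀ i ∈ L, i ≤ j) →
      L.foldl (fun a i => if p (PySem.List.pyGetD cs i ' ') then i else a) a ≤ j := by
  intro L
  induction L with
  | nil => intro a ha _; simpa using ha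
  | cons i L ih =>
    intro a ha h
    simp only [List.foldl_cons]
    refine ih _ ?_ (fun k hk => h k (by simp [hk]))
    have : i ≤ j := h i (by simp)
    split_ifs <;> omega

theorem pvLast_le (cs : List Char) (p : Char → Bool) (j : Int) (L : List Int)
    (h : ∀ i ∈ L, i ≤ j) (hj : -1 ≤ j) : pvLast cs p L ≤ j :=
  pvFoldl_le cs p j L (-1) hj h

theorem pvLast_append_singleton (cs : List Char) (r : Char → Bool) (L : List Int) (j : Int) :
    pvLast cs r (L ++ [j])
      = if r (PySem.List.pyGetD cs j ' ') then j else pvLast cs r L := by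
  simp [pvLast, List.foldl_append]

theorem pvLast_or (cs : List Char) (p q : Char → Bool) :
    ∀ L : List Int, L.Pairwise (· < ·) → (∀ i ∈ L, 0 ≤ i) →
      pvLast cs (fun x => p x || q x) L = max (pvLast cs p L) (pvLast cs q L) := by
  intro L
  induction L using List.reverseRecOn with
  | nil => intro _ _; simp [pvLast]
  | append_singleton L j ih =>
    intro hpw hnn
    have hparts := List.pairwise_append.mp hpw
    have hlt : ∀ i ∈ L, i < j := fun i hi => hparts.2.2 i hi j (by simp)
    have hj : 0 ≤ j := hnn j (by simp)
    have hnn' : ∀ i ∈ L, 0 ≤ i := fun i hi => hnn i (by simp [hi])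
    have hp' : pvLast cs p L ≤ j := pvLast_le cs p j L (fun i hi => le_of_lt (hlt i hi)) (by omega)
    have hq' : pvLast cs q L ≤ j := pvLast_le cs q j L (fun i hi => le_of_lt (hlt i hi)) (by omega)
    rw [pvLast_append_singleton, pvLast_append_singleton, pvLast_append_singleton,
      ih hparts.1 hnn']
    by_cases hpj : p (PySem.List.pyGetD cs j ' ') <;>
      by_cases hqj : q (PySem.List.pyGetD cs j ' ') <;> simp [hpj, hqj] <;> omega

theorem pvFoldl_max_split (li : Char → Int) :
    ∀ (cls : List Char) (a b : Int),
      cls.foldl (fun x c => max x (li c)) (max a b)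
        = max a (cls.foldl (fun x c => max x (li c)) b) := by
  intro cls
  induction cls with
  | nil => intro a b; simp
  | cons c cls ih =>
    intro a b
    simp only [List.foldl_cons]
    rw [max_assoc, ih]

theorem pvLast_contains (cs : List Char) :
    ∀ (cls : List Char) (L : List Int), L.Pairwise (· < ·) → (∀ i ∈ L, 0 ≤ i) →
      pvLast cs (fun x => cls.contains x) L
        = cls.foldl (fun b c => max b (pvLast cs (fun x => x == c) L)) (-1) := by
  intro cls
  induction cls with
  | nil =>
    intro L _ _
    simp only [List.foldl_nil]
    unfold pvLast
    induction L with
    | nil => simp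
    | cons i L ih => simpa using ih
  | cons c cls ih =>
    intro L hpw hnn
    have hfun : (fun x => (c :: cls).contains x)
        = (fun x => (x == c) || cls.contains x) := by
      funext x; simp only [List.contains_cons]
    rw [hfun, pvLast_or cs _ _ L hpw hnn, ih L hpw hnn]
    simp only [List.foldl_cons]
    rw [max_comm (-1) (pvLast cs (fun x => x == c) L), pvFoldl_max_split]

theorem pvFirst_append (cs : List Char) (p : Char → Bool) :
    ∀ (xs ys : List Int), (∀ i ∈ xs, 0 ≤ i) →
      pvFirst cs p (xs ++ ys)
        = if pvFirst cs p xs = -1 then pvFirst cs p ys else pvFirst cs p xs := by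
  intro xs
  induction xs with
  | nil => intro ys _; simp [pvFirst]
  | cons i xs ih =>
    intro ys h
    have hi : 0 ≤ i := h i (by simp)
    have hxs : ∀ j ∈ xs, 0 ≤ j := fun j hj => h j (by simp [hj])
    simp only [List.cons_append, pvFirst]
    by_cases hp : p (PySem.List.pyGetD cs i ' ')
    · simp only [hp, if_true]
      have : ¬ (i = -1) := by omega
      simp [this]
    · simp only [hp, if_false]
      exact ih ys hxs

theorem pvFirst_reverse (cs : List Char) (p : Char → Bool) :
    ∀ L : List Int, (∀ i ∈ L, 0 ≤ i) →
      pvFirst cs p L.reverse = pvLast cs p L := by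
  intro L
  induction L with
  | nil => intro _; simp [pvFirst, pvLast]
  | cons i L ih =>
    intro h
    have hi : 0 ≤ i := h i (by simp)
    have hL : ∀ j ∈ L, 0 ≤ j := fun j hj => h j (by simp [hj])
    have hstep : pvLast cs p (i :: L)
        = if pvLast cs p L = -1 then (if p (PySem.List.pyGetD cs i ' ') then i else (-1))
          else pvLast cs p L := by
      unfold pvLast
      simp only [List.foldl_cons]
      exact pvLast_init cs p L _ hL
    rw [List.reverse_cons, pvFirst_append cs p _ _ (fun j hj => hL j (List.mem_reverse.mp hj)),
      ih hL, hstep]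
    simp [pvFirst]

theorem pvALoop_eq (cs : List Char) (e : Int) :
    ∀ L : List Int, (∀ i ∈ L, 0 ≤ i) →
      pvALoop cs e L
        = if pvFirst cs (fun x => pvPunct.contains x) L = -1 then e
          else pvFirst cs (fun x => pvPunct.contains x) L + 1 := by
  intro L
  induction L with
  | nil => intro _; simp [pvALoop, pvFirst]
  | cons i L ih =>
    intro h
    have hi : 0 ≤ i := h i (by simp)
    have hL : ∀ j ∈ L, 0 ≤ j := fun j hj => h j (by simp [hj])
    by_cases hp : PySem.List.pyGetD cs i ' ' ∈ pvPunct
    · have hne : ¬ (i = -1) := by omega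
      simp [pvALoop, pvFirst, hp, hne]
    · simp [pvALoop, pvFirst, hp, ih hL]

-- `[c].isPrefixOf (w.drop i)` for i ≤ len is exactly a character test at index i
theorem pvPrefixSingle (w : List Char) (c : Char) (hc : (' ' == c) = false) :
    ∀ i : Nat, i ≤ w.length →
      [c].isPrefixOf (w.drop i) = (PySem.List.pyGetD w (i : Int) ' ' == c) := by
  intro i hi
  cases h : w.drop i with
  | nil =>
    have hlen : w.length ≤ i := List.drop_eq_nil_iff.mp h
    have : PySem.List.pyGetD w (i : Int) ' ' = ' ' := by
      rw [PySem.List.pyGetD_natCast]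
      exact List.getD_eq_default _ _ hlen
    simp [List.isPrefixOf, this, hc]
  | cons x xs =>
    have hlt : i < w.length := by
      by_contra hcon
      have hnil : w.drop i = [] := List.drop_eq_nil_iff.mpr (by omega)
      rw [hnil] at h
      simp at h
    have hx : x = w[i] := by
      have h2 := List.drop_eq_getElem_cons hlt
      rw [h] at h2
      exact (List.cons_eq_cons.mp h2).1
    have hg : PySem.List.pyGetD w (i : Int) ' ' = w[i] := by
      rw [PySem.List.pyGetD_natCast]
      exact List.getD_eq_getElem w ' ' hlt
    subst hx
    simp [List.isPrefixOf, hg]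
    exact eq_comm

theorem pvGo_eq (w : List Char) (c : Char) (hc : (' ' == c) = false) :
    ∀ k : Nat, k ≤ w.length →
      PySem.Chars.rfind.go w [c] k
        = pvFirst w (fun x => x == c) (PySem.List.pyRange (k : Int) (-1) (-1)) := by
  intro k
  induction k with
  | zero =>
    intro hk
    rw [PySem.Chars.rfind.go]
    have hr : PySem.List.pyRange ((0 : Nat) : Int) (-1) (-1) = [(0 : Int)] := by
      rw [show ((0 : Nat) : Int) = (0 : Int) by norm_num]
      rw [PySem.List.pyRange_neg_one_cons (by norm_num)]
      rw [show (0 : Int) - 1 = -1 by ring, PySem.List.pyRange_neg_one_eq_nil le_rfl]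
    rw [hr]
    have hpre := pvPrefixSingle w c hc 0 (by omega)
    simp only [List.drop_zero, Nat.cast_zero] at hpre
    simp [pvFirst, hpre]
  | succ j ih =>
    intro hk
    rw [PySem.Chars.rfind.go]
    have hstep : ((j + 1 : Nat) : Int) - 1 = ((j : Nat) : Int) := by push_cast; ring
    rw [PySem.List.pyRange_neg_one_cons (by push_cast; omega), hstep]
    simp only [pvFirst]
    rw [pvPrefixSingle w c hc (j + 1) hk, ih (by omega)]

theorem pvRfind_eq (w : List Char) (c : Char) (hc : (' ' == c) = false) :
    PySem.Chars.rfind w [c]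
      = pvLast w (fun x => x == c) (PySem.List.pyRange 0 (w.length : Int) 1) := by
  unfold PySem.Chars.rfind
  rw [pvGo_eq w c hc w.length le_rfl]
  rw [PySem.List.pyRange_neg_one_eq_reverse]
  have h1 : (-1 : Int) + 1 = 0 := by ring
  rw [h1]
  have hnn : ∀ i ∈ PySem.List.pyRange 0 ((w.length : Int) + 1) 1, 0 ≤ i := by
    intro i hi
    exact (PySem.List.mem_pyRange_one.mp hi).1
  rw [pvFirst_reverse w _ _ hnn]
  rw [PySem.List.pyRange_one_succ_right (by omega), pvLast_append_singleton]
  have hout : PySem.List.pyGetD w ((w.length : Nat) : Int) ' ' = ' ' := by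
    rw [PySem.List.pyGetD_natCast]
    exact List.getD_eq_default _ _ le_rfl
  simp [hout, hc]

-- index shift: folding over the window w at offsets 0.. equals folding over cs at offsets s..
theorem pvShift (cs w : List Char) (p : Char → Bool) (s : Int) :
    ∀ (R : List Int) (aw : Int), (∀ k ∈ R, 0 ≤ k) →
      (∀ k ∈ R, PySem.List.pyGetD cs (s + k) ' ' = PySem.List.pyGetD w k ' ') →
      R.foldl (fun a k => if p (PySem.List.pyGetD cs (s + k) ' ') then s + k else a)
          (if aw = -1 then -1 else s + aw)
        = (if R.foldl (fun a k => if p (PySem.List.pyGetD w k ' ') then k else a) aw = -1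
           then -1
           else s + R.foldl (fun a k => if p (PySem.List.pyGetD w k ' ') then k else a) aw) := by
  intro R
  induction R with
  | nil => intro aw _ _; simp
  | cons k R ih =>
    intro aw hnn h
    have hk := h k (by simp)
    have hk0 : 0 ≤ k := hnn k (by simp)
    have hnn' : ∀ j ∈ R, 0 ≤ j := fun j hj => hnn j (by simp [hj])
    have h' : ∀ j ∈ R, PySem.List.pyGetD cs (s + j) ' ' = PySem.List.pyGetD w j ' ' :=
      fun j hj => h j (by simp [hj])
    simp only [List.foldl_cons]
    rw [hk]
    by_cases hp : p (PySem.List.pyGetD w k ' ')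
    · simp only [hp, if_true]
      have hne : (if k = -1 then (-1 : Int) else s + k) = s + k := by
        have : ¬ (k = -1) := by omega
        simp [this]
      rw [← hne, ih _ hnn' h']
    · simp only [hp, if_false]
      exact ih aw hnn' h'

-- pyRange s e 1 is the shift by s of pyRange 0 (e-s) 1
theorem pvRangeShift (s e : Int) :
    PySem.List.pyRange s e 1 = (PySem.List.pyRange 0 (e - s) 1).map (fun k => s + k) := by
  rw [PySem.List.pyRange_one, PySem.List.pyRange_one]
  simp [List.map_map, Function.comp]

theorem pvRfindFrom_eq (cs : List Char) (c : Char) (s e : Int) (hc : (' ' == c) = false)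
    (hs : 0 ≤ s) (hse : s ≤ e) (hen : e ≤ (cs.length : Int)) :
    PySem.Chars.rfindFrom cs [c] s (some e)
      = pvLast cs (fun x => x == c) (PySem.List.pyRange s e 1) := by
  have h1 : ¬ ((cs.length : Int) < e) := by omega
  have h2 : ¬ (e < 0) := by omega
  have h3 : ¬ (s < 0) := by omega
  have h4 : ¬ (e < s) := by omega
  simp only [PySem.Chars.rfindFrom, h1, h2, h3, h4, if_false]
  rw [pvRfind_eq _ c hc]
  have hwlen : ((((cs.take e.toNat).drop s.toNat).length : Nat) : Int) = e - s := by
    simp only [List.length_drop, List.length_take]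
    omega
  rw [hwlen]
  have hnn : ∀ k ∈ PySem.List.pyRange 0 (e - s) 1, 0 ≤ k := by
    intro k hk
    exact (PySem.List.mem_pyRange_one.mp hk).1
  have hcmp : ∀ k ∈ PySem.List.pyRange 0 (e - s) 1,
      PySem.List.pyGetD cs (s + k) ' '
        = PySem.List.pyGetD ((cs.take e.toNat).drop s.toNat) k ' ' := by
    intro k hk
    have hb := PySem.List.mem_pyRange_one.mp hk
    have hlt : s + k < (cs.length : Int) := by omega
    have hwl : (((cs.take e.toNat).drop s.toNat).length : Int) = e - s := hwlen
    rw [PySem.List.pyGetD_eq_getElem cs ' ' (by omega) hlt,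
      PySem.List.pyGetD_eq_getElem _ ' ' (by omega) (by omega)]
    rw [List.getElem_drop, List.getElem_take]
    congr 1
    omega
  have happ := pvShift cs ((cs.take e.toNat).drop s.toNat) (fun x => x == c) s
    (PySem.List.pyRange 0 (e - s) 1) (-1) hnn hcmp
  simp only [reduceIte] at happ
  rw [pvRangeShift s e]
  unfold pvLast
  rw [List.foldl_map]
  exact happ.symm

theorem pvMain (text : String) (pos : Int) :
    snap_to_boundary_py text pos = snap_to_boundary_py_alt text pos := by
  by_cases hpos : pos ≤ 0
  · simp [snap_to_boundary_py, snap_to_boundary_py_alt, hpos]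
  · simp only [snap_to_boundary_py, snap_to_boundary_py_alt, if_neg hpos,
      PySem.Str.len_eq, PySem.Str.rfindFrom_eq, String.toList_ofList]
    have he0 : 0 ≤ min pos ((text.toList.length : Nat) : Int) := by omega
    set cs := text.toList with hcs
    set e := min pos ((cs.length : Nat) : Int) with he
    set s := max 0 (e - 40) with hs
    have hs0 : 0 ≤ s := by omega
    have hse : s ≤ e := by omega
    have hen : e ≤ (cs.length : Int) := by omega
    have hrange : PySem.List.pyRange (e - 1) (s - 1) (-1)
        = (PySem.List.pyRange s e 1).reverse := by
      rw [PySem.List.pyRange_neg_one_eq_reverse]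
      rw [show s - 1 + 1 = s by ring, show e - 1 + 1 = e by ring]
    have hnnL : ∀ i ∈ PySem.List.pyRange s e 1, 0 ≤ i := by
      intro i hi
      have := (PySem.List.mem_pyRange_one.mp hi).1
      omega
    have hnnR : ∀ i ∈ (PySem.List.pyRange s e 1).reverse, 0 ≤ i :=
      fun i hi => hnnL i (List.mem_reverse.mp hi)
    rw [hrange, pvALoop_eq cs e _ hnnR, pvFirst_reverse cs _ _ hnnL]
    have hpw : (PySem.List.pyRange s e 1).Pairwise (· < ·) :=
      PySem.List.pairwise_lt_pyRange_one s e
    have hbest : pvPunct.foldl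
        (fun b c => max b (PySem.Chars.rfindFrom cs [c] s (some e))) (-1)
          = pvLast cs (fun x => pvPunct.contains x) (PySem.List.pyRange s e 1) := by
      rw [pvLast_contains cs pvPunct _ hpw hnnL]
      simp only [pvPunct, List.foldl_cons, List.foldl_nil]
      rw [pvRfindFrom_eq cs '。' s e (by decide) hs0 hse hen,
        pvRfindFrom_eq cs '！' s e (by decide) hs0 hse hen,
        pvRfindFrom_eq cs '？' s e (by decide) hs0 hse hen,
        pvRfindFrom_eq cs '.' s e (by decide) hs0 hse hen,
        pvRfindFrom_eq cs '!' s e (by decide) hs0 hse hen,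
        pvRfindFrom_eq cs '?' s e (by decide) hs0 hse hen,
        pvRfindFrom_eq cs '\n' s e (by decide) hs0 hse hen]
    rw [hbest]

-- ===== VERDICT (by name: the statement is the Claim_ definition above) =====
theorem snap_to_boundary_py_spec : Claim_equal_snap_to_boundary_py := by
  unfold Claim_equal_snap_to_boundary_py
  intro text pos _
  unfold Spec_snap_to_boundary_py
  exact pvMain text pos
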